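-- pv_equiv track=rewrite | github.com/pypi-data/pypi-mirror-257 | packages/chemspyd/chemspyd-1.0.0-py3-none-any.whl/chemspyd/autosuite/utils.py | _get_name_overlap
-- ===== SOURCE A (Python) =====
-- from typing import Union, List, Dict, Any
--
-- def _get_name_overlap(names: List[str]) -> str:
--
--     if len(names) == 1:
--         return names[0]
--
--     shortest = min([len(n) for n in names])
--     overlap = ""
--
--     for i in range(shortest):
--         char = names[0][i]
--         for n in names[1:]:
--             if n[i] != char:
--                 break
--         else:
--             overlap += char
--
--     return overlap
-- ===== SOURCE B (Python) =====
-- def _get_name_overlap(names):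
--     if len(names) == 1:
--         return names[0]
--     first = names[0]
--     alive = list(range(len(first)))
--     for n in names[1:]:
--         alive = [i for i in alive if i < len(n) and n[i] == first[i]]
--     return "".join(first[i] for i in alive)
-- ===== Notes on version B (the rewrite author's own statement) =====
-- stated objective: alternative
-- what changed: Inverts the loop nesting: instead of A's per-position outer loop with an inner sentinel-break scan over the other names appending to a string, B keeps a worklist of surviving positions (initially range(len(names[0]))) and narrows it once per name with an in-range-and-equal filter, then joins the survivors at the end.
-- outside the precondition, e.g. on _get_name_overlap([]): A raises ValueError, B raises IndexError
import Mathlib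
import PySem

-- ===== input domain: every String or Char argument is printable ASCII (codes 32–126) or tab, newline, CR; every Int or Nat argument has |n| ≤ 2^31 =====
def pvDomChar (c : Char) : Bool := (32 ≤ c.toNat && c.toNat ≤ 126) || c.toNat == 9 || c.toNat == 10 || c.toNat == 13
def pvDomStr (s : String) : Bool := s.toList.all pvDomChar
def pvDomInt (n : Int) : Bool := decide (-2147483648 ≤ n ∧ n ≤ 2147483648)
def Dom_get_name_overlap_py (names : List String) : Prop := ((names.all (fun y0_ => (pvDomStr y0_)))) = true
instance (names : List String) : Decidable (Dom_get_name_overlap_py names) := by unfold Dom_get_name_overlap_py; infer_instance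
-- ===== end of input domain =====

-- B inverts A's loop nesting: instead of scanning all names at each position (inner
-- sentinel-break loop, string accumulator), it keeps a worklist of surviving positions
-- and narrows it once per name, then joins the survivors. Alternative decomposition, same cost.


-- ===== PORT A =====
def get_name_overlap_py (names : List String) : String :=
  if names.length == 1 then names.headD "" else
  -- shortest = min([len(n) for n in names]); min([]) raises ValueError, excluded by Pre_
  let shortest : Int := (PySem.List.min? (names.map (fun n : String => (n.toList.length : Int))) (fun v => v)).getD 0
  (PySem.List.pyRange 0 shortest 1).foldl (fun overlap i =>
    -- char = names[0][i]; i < shortest ≤ len(names[0]) so the index is in range, getD is exact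
    let char : Char := (PySem.Str.pyGet? (names.headD "") i).getD ' '
    -- for n in names[1:]: if n[i] != char: break / else: overlap += char
    if (names.drop 1).all (fun n => (PySem.Str.pyGet? n i).getD ' ' == char)
    then overlap ++ String.singleton char else overlap) ""

-- ===== PORT B =====
def get_name_overlap_py_alt (names : List String) : String :=
  if names.length == 1 then names.headD "" else
  let first : String := names.headD ""
  -- alive = list(range(len(first))); for n in names[1:]: alive = [i for i in alive if i < len(n) and n[i] == first[i]]
  let alive : List Int := (names.drop 1).foldl
    (fun alive n => alive.filter (fun i =>
      decide (i < PySem.Str.len n) && ((PySem.Str.pyGet? n i).getD ' ' == (PySem.Str.pyGet? first i).getD ' ')))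
    (PySem.List.pyRange 0 (PySem.Str.len first) 1)
  -- "".join(first[i] for i in alive); every surviving i is in range, getD is exact
  String.ofList (alive.map (fun i => (PySem.Str.pyGet? first i).getD ' '))

-- ===== PRECONDITION & SPEC =====
-- Pre_ excludes only names = [], on which A raises ValueError (min of an empty sequence).
def Pre_get_name_overlap_py (names : List String) : Prop := names ≠ []
instance (names : List String) : Decidable (Pre_get_name_overlap_py names) := by unfold Pre_get_name_overlap_py; infer_instance
def pvWitness_get_name_overlap_py : List String := (["abcx", "abdx", "abq"])

def Spec_get_name_overlap_py (names : List String) (out : String) : Prop := out = get_name_overlap_py_alt names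
instance (names : List String) (out : String) : Decidable (Spec_get_name_overlap_py names out) := by unfold Spec_get_name_overlap_py; infer_instance

-- ===== CLAIM (what is proved, stated in full; the proofs are below) =====
def Claim_equal_get_name_overlap_py : Prop := ∀ (names : List String), Dom_get_name_overlap_py names → Pre_get_name_overlap_py names → Spec_get_name_overlap_py names (get_name_overlap_py names)

-- ===== LEMMAS AND PROOFS =====

theorem pv_foldl_min_le (l : List Nat) (a : Nat) : l.foldl min a ≤ a := by
  induction l generalizing a with
  | nil => simp
  | cons b t ih => exact le_trans (ih (min a b)) (min_le_left a b)

theorem pv_lt_foldl_min (l : List Nat) (a k : Nat) :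
    k < l.foldl min a ↔ k < a ∧ ∀ x ∈ l, k < x := by
  induction l generalizing a with
  | nil => simp
  | cons b t ih =>
    simp only [List.foldl_cons, ih, lt_min_iff, List.mem_cons]
    constructor
    · rintro ⟨⟨ha, hb⟩, ht⟩
      refine ⟨ha, fun x hx => ?_⟩
      rcases hx with h | h
      · exact h ▸ hb
      · exact ht x h
    · rintro ⟨ha, h⟩
      exact ⟨⟨ha, h b (Or.inl rfl)⟩, fun x hx => h x (Or.inr hx)⟩

theorem pv_filterMap_ite (p : Nat → Bool) (c : Nat → Char) (l : List Nat) :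
    l.filterMap (fun k => if p k then some (c k) else none) = (l.filter p).map c := by
  induction l with
  | nil => rfl
  | cons x t ih => by_cases h : p x <;> simp [h, ih]

theorem pv_foldl_filter {α β : Type} (l : List β) (xs : List α) (p : β → α → Bool) :
    l.foldl (fun acc n => acc.filter (p n)) xs
      = xs.filter (fun x => l.all (fun n => p n x)) := by
  induction l generalizing xs with
  | nil => simp
  | cons b t ih =>
    simp only [List.foldl_cons, ih, List.filter_filter]
    apply List.filter_congr
    intro x _
    simp [Bool.and_comm]

theorem pv_all_and {α : Type} (l : List α) (p q : α → Bool) :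
    l.all (fun x => p x && q x) = (l.all p && l.all q) := by
  induction l with
  | nil => rfl
  | cons b t ih =>
    simp only [List.all_cons, ih]
    cases p b <;> cases q b <;> simp

theorem pv_filter_range_lt (a m : Nat) (h : m ≤ a) (c : Nat → Bool) :
    (List.range a).filter (fun k => decide (k < m) && c k) = (List.range m).filter c := by
  obtain ⟨d, rfl⟩ := Nat.exists_eq_add_of_le h
  rw [List.range_add, List.filter_append]
  have h2 : ((List.range d).map (fun x => m + x)).filter (fun k => decide (k < m) && c k) = [] := by
    rw [List.filter_map, List.filter_eq_nil_iff.mpr]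
    · simp
    · intro x _
      simp only [Function.comp]
      have : ¬ (m + x < m) := by omega
      simp [this]
  rw [h2, List.append_nil]
  apply List.filter_congr
  intro k hk
  have : k < m := List.mem_range.mp hk
  simp [this]

-- core: A's position loop over range(shortest) = B's survivor list mapped through first
theorem pv_core (s : List Char) (rest : List (List Char)) :
    (List.range ((rest.map List.length).foldl min s.length)).filterMap
      (fun k => if rest.all (fun r => (r[k]?.getD ' ') == (s[k]?.getD ' '))
                then some (s[k]?.getD ' ') else none)
    = ((List.range s.length).filter
        (fun k => rest.all (fun r => decide (k < r.length) && ((r[k]?.getD ' ') == (s[k]?.getD ' '))))).map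
        (fun k => s[k]?.getD ' ') := by
  rw [pv_filterMap_ite]
  congr 1
  have hle : (rest.map List.length).foldl min s.length ≤ s.length := pv_foldl_min_le _ _
  rw [← pv_filter_range_lt s.length ((rest.map List.length).foldl min s.length) hle]
  apply List.filter_congr
  intro k hk
  have hk' : k < s.length := List.mem_range.mp hk
  rw [pv_all_and]
  congr 1
  rw [Bool.eq_iff_iff, decide_eq_true_iff, pv_lt_foldl_min, List.all_eq_true]
  constructor
  · intro h r hr
    simp only [decide_eq_true_iff]
    exact h.2 r.length (List.mem_map.mpr ⟨r, hr, rfl⟩)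
  · intro h
    refine ⟨hk', ?_⟩
    intro x hx
    rcases List.mem_map.mp hx with ⟨r, hr, rfl⟩
    simpa using h r hr

theorem pv_foldl_min_cast (l : List String) (a : Nat) :
    (l.map (fun n : String => (n.toList.length : Int))).foldl min (a : Int)
      = (((l.map (fun n : String => n.toList.length)).foldl min a : Nat) : Int) := by
  induction l generalizing a with
  | nil => simp
  | cons s t ih =>
    simp only [List.map_cons, List.foldl_cons, ← Nat.cast_min, ih]

theorem pv_str_toList_eq (a b : String) (h : a.toList = b.toList) : a = b := by
  have := congrArg String.ofList h
  simpa using this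

theorem pv_foldl_str (l : List Nat) (p : Nat → Bool) (c : Nat → Char) (acc : String) :
    l.foldl (fun ov k => if p k then ov ++ String.singleton (c k) else ov) acc
      = acc ++ String.ofList (l.filterMap (fun k => if p k then some (c k) else none)) := by
  induction l generalizing acc with
  | nil =>
    apply pv_str_toList_eq
    simp
  | cons k t ih =>
    by_cases hp : p k <;>
      · simp only [List.foldl_cons, hp, if_true, List.filterMap_cons, ih]
        apply pv_str_toList_eq
        simp

-- ===== VERDICT (by name: the statement is the Claim_ definition above) =====
theorem get_name_overlap_py_spec : Claim_equal_get_name_overlap_py := by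
  intro names _ hpre
  unfold Spec_get_name_overlap_py get_name_overlap_py get_name_overlap_py_alt
  cases names with
  | nil => exact absurd rfl hpre
  | cons s rest =>
    by_cases hlen : (s :: rest).length == 1
    · have h0 : rest = [] := by simpa using hlen
      subst h0
      simp
    · simp only [hlen, Bool.false_eq_true, if_false]
      rw [List.map_cons, PySem.List.min?_id_cons, Option.getD_some, pv_foldl_min_cast,
        PySem.List.pyRange_one]
      rw [List.foldl_map]
      simp only [sub_zero, Int.toNat_natCast, zero_add, PySem.Str.pyGet?_natCast,
        List.headD_cons, List.drop_succ_cons, List.drop_zero]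
      rw [pv_foldl_str (p := fun k => rest.all (fun n => (n.toList[k]?.getD ' ') == (s.toList[k]?.getD ' ')))
            (c := fun k => s.toList[k]?.getD ' ')]
      rw [String.empty_append]
      -- reduce B's side
      rw [show PySem.Str.len s = (s.toList.length : Int) from PySem.Str.len_eq s]
      rw [PySem.List.pyRange_one]
      simp only [sub_zero, Int.toNat_natCast, zero_add]
      rw [pv_foldl_filter, List.filter_map, List.map_map]
      congr 1
      have := pv_core s.toList (rest.map (fun n : String => n.toList))
      simp only [List.map_map, Function.comp_def, List.all_map, PySem.Str.pyGet?_natCast,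
        PySem.Str.len_eq, Nat.cast_lt] at this ⊢
      rw [this]
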